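-- pv_equiv track=rewrite | github.com/kkShrihari/Rosalind | Python_exercises/Kmer_code.py | Kmer_code
-- ===== SOURCE A (Python) =====
-- def Kmer_code(kmer):
--     """
--     Converts a k-mer into an integer using a 2-bit encoding scheme:
--     A = 00, C = 01, G = 10, T = 11
--     Uses bit shifting to generate a unique numeric code.
--     """
--     value = 0
--     for x in kmer:
--         value = value << 2
--         if x == "G":
--            value |= 2
--         elif x == "T":
--            value |= 3
--         elif x == "C":
--             value |= 1
--     return value
-- ===== SOURCE B (Python) =====
-- def Kmer_code(kmer):
--     digits = {"C": "1", "G": "2", "T": "3"}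
--     return int("0" + "".join(digits.get(x, "0") for x in kmer), 4)
-- ===== Notes on version B (the rewrite author's own statement) =====
-- stated objective: idiomatic
-- what changed: Replaces the bit-shift/bitwise-or accumulation loop by mapping each character to a base-4 digit character via a dict with default '0', joining them into one string, and parsing it once with int('0'+s, 4).
import Mathlib
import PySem

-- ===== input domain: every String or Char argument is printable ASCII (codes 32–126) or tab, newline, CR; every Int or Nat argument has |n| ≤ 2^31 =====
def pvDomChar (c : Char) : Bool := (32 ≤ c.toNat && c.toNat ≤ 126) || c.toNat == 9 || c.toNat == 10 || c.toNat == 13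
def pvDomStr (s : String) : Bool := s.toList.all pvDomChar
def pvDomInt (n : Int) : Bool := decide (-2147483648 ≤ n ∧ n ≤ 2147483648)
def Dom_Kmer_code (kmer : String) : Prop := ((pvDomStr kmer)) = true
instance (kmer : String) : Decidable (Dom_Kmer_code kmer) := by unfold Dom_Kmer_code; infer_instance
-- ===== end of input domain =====

-- B replaces the bit-shift/or accumulation loop by a base-4 digit string parsed once with int(_, 4) (objective: idiomatic; same cost).

-- ===== PORT A =====
def Kmer_code (kmer : String) : Int :=
  kmer.toList.foldl (fun (value : Int) x =>
    let value := value <<< (2 : Nat)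
    if x = 'G' then PySem.Int.bor value 2
    else if x = 'T' then PySem.Int.bor value 3
    else if x = 'C' then PySem.Int.bor value 1
    else value) 0

-- ===== PORT B =====
def kmerDigits : PySem.Dict Char Char := PySem.Dict.ofList [('C', '1'), ('G', '2'), ('T', '3')]

-- int(s, 4) is ported as the standard base-4 parse; exact here since every char of s is one of '0'..'3'
def Kmer_code_alt (kmer : String) : Int :=
  let s : List Char := '0' :: kmer.toList.map (fun x => kmerDigits.getD x '0')
  s.foldl (fun (a : Int) c => a * 4 + ((c.toNat : Int) - 48)) 0

-- ===== PRECONDITION & SPEC =====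
def Spec_Kmer_code (kmer : String) (out : Int) : Prop := out = Kmer_code_alt kmer
instance (kmer : String) (out : Int) : Decidable (Spec_Kmer_code kmer out) := by unfold Spec_Kmer_code; infer_instance

-- ===== CLAIM (what is proved, stated in full; the proofs are below) =====
def Claim_equal_Kmer_code : Prop := ∀ (kmer : String), Dom_Kmer_code kmer → Spec_Kmer_code kmer (Kmer_code kmer)

-- ===== LEMMAS AND PROOFS =====
theorem lor_four_bit (n : Nat) (b0 b1 : Bool) :
    (4 * n) ||| (Nat.bit b0 (Nat.bit b1 0)) = 4 * n + (Nat.bit b0 (Nat.bit b1 0)) := by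
  have h : 4 * n = Nat.bit false (Nat.bit false n) := by simp [Nat.bit_val]; ring
  rw [h, Nat.lor_bit, Nat.lor_bit]
  simp [Nat.bit_val]
  cases b0 <;> cases b1 <;> simp <;> ring

theorem lor_four (n d : Nat) (hd : d < 4) : (4 * n) ||| d = 4 * n + d := by
  interval_cases d
  · simp
  · exact lor_four_bit n true false
  · exact lor_four_bit n false true
  · exact lor_four_bit n true true

theorem shift_cast (n : Nat) : ((n : Int) <<< (2 : Nat)) = ((4 * n : Nat) : Int) := by
  simp [Int.shiftLeft_eq]; ring

-- B's digit table, characterised as A's branch chain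
theorem dig_spec (x : Char) :
    kmerDigits.getD x '0'
      = if x = 'G' then '2' else if x = 'T' then '3' else if x = 'C' then '1' else '0' := by
  by_cases hG : x = 'G'
  · simp [hG]; rfl
  by_cases hT : x = 'T'
  · simp [hG, hT]; rfl
  by_cases hC : x = 'C'
  · simp [hG, hT, hC]; rfl
  · have hk : kmerDigits = PySem.Dict.mk [('C', '1'), ('G', '2'), ('T', '3')] := by rfl
    rw [hk]
    simp [hG, hT, hC, PySem.Dict.getD, PySem.Dict.get?, PySem.Dict.get?_mk_cons,
      show ('C' == x) = false from by simp [Ne.symm hC],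
      show ('G' == x) = false from by simp [Ne.symm hG],
      show ('T' == x) = false from by simp [Ne.symm hT]]

-- A's loop body on a nonnegative accumulator is "times 4 plus the base-4 digit B assigns to x"
theorem step_eq (n : Nat) (x : Char) :
    (let v := ((n : Int)) <<< (2 : Nat)
     if x = 'G' then PySem.Int.bor v 2
     else if x = 'T' then PySem.Int.bor v 3
     else if x = 'C' then PySem.Int.bor v 1
     else v)
    = ((4 * n + ((kmerDigits.getD x '0').toNat - 48) : Nat) : Int) := by
  simp only [shift_cast, dig_spec]
  split_ifs with hG hT hC
  · rw [show (2 : Int) = ((2 : Nat) : Int) from rfl, PySem.Int.bor_natCast,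
      lor_four n 2 (by norm_num),
      show ('2' : Char).toNat - 48 = 2 from rfl]
  · rw [show (3 : Int) = ((3 : Nat) : Int) from rfl, PySem.Int.bor_natCast,
      lor_four n 3 (by norm_num),
      show ('3' : Char).toNat - 48 = 3 from rfl]
  · rw [show (1 : Int) = ((1 : Nat) : Int) from rfl, PySem.Int.bor_natCast,
      lor_four n 1 (by norm_num),
      show ('1' : Char).toNat - 48 = 1 from rfl]
  · rw [show ('0' : Char).toNat - 48 = 0 from rfl]
    push_cast
    ring

-- both loops, run over the same characters from matching nonnegative accumulators, stay equal
theorem fold_eq (l : List Char) (n : Nat) :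
    l.foldl (fun (value : Int) x =>
      let value := value <<< (2 : Nat)
      if x = 'G' then PySem.Int.bor value 2
      else if x = 'T' then PySem.Int.bor value 3
      else if x = 'C' then PySem.Int.bor value 1
      else value) ((n : Nat) : Int)
    = (l.map (fun x => kmerDigits.getD x '0')).foldl
        (fun (a : Int) c => a * 4 + ((c.toNat : Int) - 48)) ((n : Nat) : Int) := by
  induction l generalizing n with
  | nil => simp
  | cons x xs ih =>
    simp only [List.foldl_cons, List.map_cons]
    have hs := step_eq n x
    simp only at hs
    rw [hs]
    have hd : 48 ≤ (kmerDigits.getD x '0').toNat := by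
      rw [dig_spec]; split_ifs <;> decide
    have hcast : ((4 * n + ((kmerDigits.getD x '0').toNat - 48) : Nat) : Int)
        = ((n : Int)) * 4 + (((kmerDigits.getD x '0').toNat : Int) - 48) := by
      push_cast [hd]; ring
    rw [ih (4 * n + ((kmerDigits.getD x '0').toNat - 48)), hcast]

-- ===== VERDICT (by name: the statement is the Claim_ definition above) =====
theorem Kmer_code_spec : Claim_equal_Kmer_code := by
  intro kmer _
  show Kmer_code kmer = Kmer_code_alt kmer
  unfold Kmer_code Kmer_code_alt
  simp only [List.foldl_cons]
  rw [show ((0 : Int) * 4 + ((('0' : Char).toNat : Int) - 48)) = ((0 : Nat) : Int) from by decide]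
  exact fold_eq kmer.toList 0
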